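-- pv_equiv track=rewrite | github.com/IvinPoly/Lettcode-Solutions | ContSeq.py | contSeq
-- ===== SOURCE A (Python) =====
-- def contSeq(numbers):
--     #numbers = sorted(x for x in list1 if isinstance(x,int) )
--
--     result = []
--     temp = [numbers[0]]
--
--     for i in range(1,len(numbers)):
--         if numbers[i] == numbers[i-1]+1:
--             temp.append(numbers[i])
--         else:
--             if len(temp)==3:
--                 result.append(temp)
--             temp = [numbers[i]]
--
--     if len(temp)==3:
--         result.append(temp)
--     return result
-- ===== SOURCE B (Python) =====
-- def contSeq(numbers):
--     result = []
--     i = 0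
--     n = len(numbers)
--     while i < n:
--         j = i + 1
--         while j < n and numbers[j] == numbers[j - 1] + 1:
--             j += 1
--         if j - i == 3:
--             result.append(numbers[i:j])
--         i = j
--     return result
-- ===== Notes on version B (the rewrite author's own statement) =====
-- stated objective: alternative
-- what changed: A carries a growing temp-run accumulator plus pending-result state through one element-wise loop; B instead locates each maximal run's end index with an inner scan and slices the run out, appending it only if its length is exactly 3.
import Mathlib
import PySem

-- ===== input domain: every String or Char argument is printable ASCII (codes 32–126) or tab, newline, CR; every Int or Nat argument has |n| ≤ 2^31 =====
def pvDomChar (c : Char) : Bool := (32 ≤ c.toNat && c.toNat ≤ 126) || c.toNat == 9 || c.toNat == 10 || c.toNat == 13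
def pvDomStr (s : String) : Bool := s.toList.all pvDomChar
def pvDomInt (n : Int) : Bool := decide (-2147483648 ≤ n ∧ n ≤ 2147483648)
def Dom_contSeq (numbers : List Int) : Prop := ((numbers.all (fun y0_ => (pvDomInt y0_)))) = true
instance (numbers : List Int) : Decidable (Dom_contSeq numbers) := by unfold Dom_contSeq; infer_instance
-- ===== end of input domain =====

-- B is an alternative run-splitting implementation (inner scan finds each maximal run, kept iff its length is 3); the proved equivalence covers non-empty inputs (A raises IndexError on []).

-- ===== PORT A =====
-- A's loop body: state (result, temp, prev) where prev carries numbers[i-1] (the previously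
-- visited element); the iterated value n is numbers[i].
def stepA (st : List (List Int) × List Int × Int) (n : Int) : List (List Int) × List Int × Int :=
  if n = st.2.2 + 1 then (st.1, st.2.1 ++ [n], n)
  else ((if st.2.1.length = 3 then st.1 ++ [st.2.1] else st.1), [n], n)

-- the trailing 'if len(temp)==3: result.append(temp)' after the loop
def finA (st : List (List Int) × List Int × Int) : List (List Int) :=
  if st.2.1.length = 3 then st.1 ++ [st.2.1] else st.1

def contSeq (numbers : List Int) : List (List Int) :=
  match numbers with
  | [] => []  -- Python raises IndexError here (numbers[0]); excluded by Pre_contSeq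
  | x :: t => finA (t.foldl stepA ([], [x], x))

-- ===== PORT B =====
-- inner while loop of Source B: extend the current run while the successor relation holds;
-- returns (rest of the run after its first element, remainder of the list)
def splitRun (prev : Int) : List Int → List Int × List Int
  | [] => ([], [])
  | y :: t =>
    if y = prev + 1 then
      let p := splitRun y t
      (y :: p.1, p.2)
    else ([], y :: t)

lemma splitRun_snd_le (prev : Int) (l : List Int) : (splitRun prev l).2.length ≤ l.length := by
  induction l generalizing prev with
  | nil => simp [splitRun]
  | cons y t ih =>
    simp only [splitRun]
    split
    · exact le_trans (ih y) (Nat.le_succ _)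
    · simp

-- outer while loop of Source B: one iteration per maximal run numbers[i:j]
def goB : List Int → List (List Int)
  | [] => []
  | x :: t =>
    let p := splitRun x t
    if (x :: p.1).length = 3 then (x :: p.1) :: goB p.2 else goB p.2
termination_by l => l.length
decreasing_by all_goals exact Nat.lt_succ_of_le (splitRun_snd_le x t)

def contSeq_alt (numbers : List Int) : List (List Int) := goB numbers

-- ===== PRECONDITION & SPEC =====
-- Pre_ excludes exactly the empty list, on which A raises IndexError (numbers[0]).
def Pre_contSeq (numbers : List Int) : Prop := numbers ≠ []
instance (numbers : List Int) : Decidable (Pre_contSeq numbers) := by unfold Pre_contSeq; infer_instance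
def pvWitness_contSeq : List Int := [1, 2, 3]

def Spec_contSeq (numbers : List Int) (out : List (List Int)) : Prop := out = contSeq_alt numbers
instance (numbers : List Int) (out : List (List Int)) : Decidable (Spec_contSeq numbers out) := by unfold Spec_contSeq; infer_instance

-- ===== CLAIM (what is proved, stated in full; the proofs are below) =====
def Claim_equal_contSeq : Prop := ∀ (numbers : List Int), Dom_contSeq numbers → Pre_contSeq numbers → Spec_contSeq numbers (contSeq numbers)

-- ===== LEMMAS AND PROOFS =====

lemma goB_cons (x : Int) (t : List Int) :
    goB (x :: t) =
      (if (x :: (splitRun x t).1).length = 3 then [x :: (splitRun x t).1] else []) ++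
        goB (splitRun x t).2 := by
  rw [goB]
  split <;> simp_all

-- main loop invariant: running A's loop from state (result, temp, prev) over rest and then
-- applying the trailing flush equals result, then the (possibly completed) current run
-- temp ++ first-run-of rest (kept iff length 3), then B's output on the remainder.
lemma loopA (rest : List Int) : ∀ (result : List (List Int)) (temp : List Int) (prev : Int),
    finA (rest.foldl stepA (result, temp, prev)) =
      result ++
        (if (temp ++ (splitRun prev rest).1).length = 3 then [temp ++ (splitRun prev rest).1] else []) ++
        goB (splitRun prev rest).2 := by
  induction rest with
  | nil =>
    intro result temp prev
    simp only [List.foldl_nil, splitRun, finA, goB, List.append_nil]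
    split <;> simp
  | cons y t ih =>
    intro result temp prev
    simp only [List.foldl_cons, stepA]
    by_cases h : y = prev + 1
    · simp only [if_pos h, ih, splitRun]
      simp [List.append_assoc]
    · simp only [ih, splitRun, if_neg h]
      rw [goB_cons]
      by_cases h3 : temp.length = 3 <;> simp [h3, List.append_assoc]

-- ===== VERDICT (by name: the statement is the Claim_ definition above) =====
theorem contSeq_spec : Claim_equal_contSeq := by
  intro numbers _dom hpre
  unfold Spec_contSeq
  cases numbers with
  | nil => exact absurd rfl hpre
  | cons x t =>
    show finA (t.foldl stepA ([], [x], x)) = contSeq_alt (x :: t)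
    rw [loopA]
    unfold contSeq_alt
    rw [goB_cons]
    simp
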